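-- pv_equiv track=rewrite | github.com/albina2604/practice2 | task5.py | empty_places_in_gender_coupe
-- ===== SOURCE A (Python) =====
-- def empty_places_in_gender_coupe(carriage, gender):
--     """
--     Определяет свободные места в вагоне исключительно с мужской/женской компанией
--
--     Arg:
--         carriage(int): вагон
--
--     Returns:
--         (answer): ответ на четвертый/пятый вопрос
--     """
--     answer = []
--     for coupe in carriage:
--         answer1 = []
--         for place in coupe:
--             if not coupe[place]:
--                 answer1.append(place)
--             elif coupe[place] != gender:
--                 break
--         else:
--             if len(answer1) < 4:
--                 answer += answer1
--     return answer
-- ===== SOURCE B (Python) =====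
-- def empty_places_in_gender_coupe(carriage, gender):
--     answer = []
--     for coupe in carriage:
--         groups = {}
--         for place in coupe:
--             v = coupe[place]
--             key = v if v else None
--             groups.setdefault(key, []).append(place)
--         if set(groups) <= {None, gender} and len(groups.get(None, [])) < 4:
--             answer += groups.get(None, [])
--     return answer
-- ===== Notes on version B (the rewrite author's own statement) =====
-- stated objective: alternative
-- what changed: Replaces A's stateful break/for-else scan with a group-by: each coupe's places are bucketed into a dict keyed by their (falsy-normalized) value, validity becomes a set-subset test set(groups) <= {None, gender}, and the empty places are read off as the None bucket.
import Mathlib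
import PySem

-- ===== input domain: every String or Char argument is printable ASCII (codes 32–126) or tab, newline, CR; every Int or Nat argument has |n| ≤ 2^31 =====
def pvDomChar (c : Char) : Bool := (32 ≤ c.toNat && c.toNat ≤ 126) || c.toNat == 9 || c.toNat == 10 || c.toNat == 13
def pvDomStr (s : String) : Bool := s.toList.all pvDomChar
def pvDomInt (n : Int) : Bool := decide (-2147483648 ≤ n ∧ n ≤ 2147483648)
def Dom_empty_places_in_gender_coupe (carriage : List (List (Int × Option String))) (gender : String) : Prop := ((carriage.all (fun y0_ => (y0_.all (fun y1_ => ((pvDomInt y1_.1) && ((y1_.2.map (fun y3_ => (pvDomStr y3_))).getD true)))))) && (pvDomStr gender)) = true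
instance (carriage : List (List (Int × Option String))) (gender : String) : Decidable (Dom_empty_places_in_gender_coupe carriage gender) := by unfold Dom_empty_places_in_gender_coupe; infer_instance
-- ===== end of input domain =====

-- B replaces A's stateful break/for-else scan by a group-by: places bucketed by value into a dict, validity = a set-subset test, empties = the None bucket; objective: alternative, same return value.


-- ===== PORT A =====
-- first-match association-list lookup (= Python dict lookup under the convention)
def pvLookup (coupe : List (Int × Option String)) (p : Int) : Option String :=
  match coupe with
  | [] => none
  | (k, v) :: rest => if k = p then v else pvLookup rest p

-- Python falsiness of a dict value (None or "")
def pvFalsy (v : Option String) : Bool :=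
  match v with
  | none => true
  | some s => s == ""

-- inner for/else loop of A: returns none on break, else the collected answer1
def pvLoopA (coupe : List (Int × Option String)) (gender : String) :
    List Int → List Int → Option (List Int)
  | [], a1 => some a1
  | p :: rest, a1 =>
    let v := pvLookup coupe p
    if pvFalsy v then pvLoopA coupe gender rest (a1 ++ [p])
    else if v ≠ some gender then none
    else pvLoopA coupe gender rest a1

def empty_places_in_gender_coupe (carriage : List (List (Int × Option String))) (gender : String) : List Int :=
  carriage.foldl (fun answer coupe =>
    match pvLoopA coupe gender (coupe.map Prod.fst) [] with
    | none => answer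
    | some a1 => if a1.length < 4 then answer ++ a1 else answer) []

-- ===== PORT B =====
-- key = v if v else None
def pvNormKey (v : Option String) : Option String := if pvFalsy v then none else v

def empty_places_in_gender_coupe_alt (carriage : List (List (Int × Option String))) (gender : String) : List Int :=
  carriage.foldl (fun answer coupe =>
    let groups := (coupe.map Prod.fst).foldl
      (fun d p => d.modify (pvNormKey (pvLookup coupe p)) [] (· ++ [p]))
      PySem.Dict.empty
    if PySem.Set.issubset groups.keys (PySem.Set.ofList [none, some gender])
        && decide ((groups.getD none []).length < 4)
    then answer ++ groups.getD none [] else answer) []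

-- ===== PRECONDITION & SPEC =====
def Spec_empty_places_in_gender_coupe (carriage : List (List (Int × Option String))) (gender : String) (out : List Int) : Prop := out = empty_places_in_gender_coupe_alt carriage gender
instance (carriage : List (List (Int × Option String))) (gender : String) (out : List Int) : Decidable (Spec_empty_places_in_gender_coupe carriage gender out) := by unfold Spec_empty_places_in_gender_coupe; infer_instance

-- ===== CLAIM =====
def Claim_equal_empty_places_in_gender_coupe : Prop := ∀ (carriage : List (List (Int × Option String))) (gender : String), Dom_empty_places_in_gender_coupe carriage gender → Spec_empty_places_in_gender_coupe carriage gender (empty_places_in_gender_coupe carriage gender)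

-- ===== LEMMAS AND PROOFS =====

-- A's inner loop characterised: it succeeds iff every occupied place matches gender, collecting the falsy places
theorem pvLoopA_eq (coupe : List (Int × Option String)) (gender : String) :
    ∀ (keys a1 : List Int),
      pvLoopA coupe gender keys a1 =
        (if keys.all (fun p =>
            if pvFalsy (pvLookup coupe p) then true else pvLookup coupe p == some gender)
         then some (a1 ++ keys.filter (fun p => pvFalsy (pvLookup coupe p)))
         else none) := by
  intro keys
  induction keys with
  | nil => intro a1; simp [pvLoopA]
  | cons p rest ih =>
    intro a1
    by_cases hf : pvFalsy (pvLookup coupe p) = true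
    · simp [pvLoopA, hf, ih]
    · by_cases hg : pvLookup coupe p = some gender
      · have hfg : pvFalsy (some gender) = false := by
          rw [← hg]; exact Bool.eq_false_iff.mpr hf
        simp [pvLoopA, hg, hfg, ih]
      · have hb : (pvLookup coupe p == some gender) = false := by simp [hg]
        simp [pvLoopA, hf, hg, hb]

theorem pvNormKey_eq_none (v : Option String) : (pvNormKey v == none) = pvFalsy v := by
  cases v with
  | none => simp [pvNormKey, pvFalsy]
  | some s =>
    by_cases h : (s == "") = true
    · simp [pvNormKey, pvFalsy, h]
    · simp [pvNormKey, pvFalsy, h]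

-- the None bucket of the group-by is exactly the falsy-valued places, in order
theorem pvGroups_none (coupe : List (Int × Option String)) (keys : List Int) :
    ((keys.foldl (fun d p => d.modify (pvNormKey (pvLookup coupe p)) [] (· ++ [p]))
        PySem.Dict.empty).getD none [])
      = keys.filter (fun p => pvFalsy (pvLookup coupe p)) := by
  have h := PySem.Dict.getD_foldl_modify_append
    (l := keys.map (fun p => (pvNormKey (pvLookup coupe p), p)))
    (d := (PySem.Dict.empty : PySem.Dict (Option String) (List Int))) (c := none)
  rw [List.foldl_map] at h
  rw [h, PySem.Dict.getD_empty, List.filter_map, List.map_map, List.nil_append]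
  have hid : ((fun x : Option String × Int => x.2) ∘ fun p : Int => (pvNormKey (pvLookup coupe p), p)) = id := rfl
  rw [hid, List.map_id]
  apply List.filter_congr
  intro p _
  show (pvNormKey (pvLookup coupe p) == none) = pvFalsy (pvLookup coupe p)
  exact pvNormKey_eq_none _

-- the subset test of B equals the all() validity of A
theorem pvCond_eq (coupe : List (Int × Option String)) (gender : String) (keys : List Int) :
    PySem.Set.issubset
      ((keys.foldl (fun d p => d.modify (pvNormKey (pvLookup coupe p)) [] (· ++ [p]))
          PySem.Dict.empty).keys)
      (PySem.Set.ofList [none, some gender])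
    = keys.all (fun p =>
        if pvFalsy (pvLookup coupe p) then true else pvLookup coupe p == some gender) := by
  rw [PySem.Dict.keys_foldl_modify_key, PySem.Dict.keys_empty, PySem.Set.update_nil_left]
  apply Bool.eq_iff_iff.mpr
  rw [PySem.Set.issubset_iff, List.all_eq_true]
  constructor
  · intro h p hp
    have hm : pvNormKey (pvLookup coupe p) ∈ PySem.Set.ofList (keys.map (fun p => pvNormKey (pvLookup coupe p))) := by
      rw [PySem.Set.mem_ofList]; exact List.mem_map_of_mem hp
    have := h _ hm
    rw [PySem.Set.mem_ofList] at this
    by_cases hf : pvFalsy (pvLookup coupe p) = true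
    · simp [hf]
    · have hnf := Bool.eq_false_iff.mpr hf
      simp only [pvNormKey, hnf, Bool.false_eq_true, if_false, List.mem_cons,
        List.not_mem_nil, or_false] at this
      rcases this with h1 | h1
      · rw [h1] at hnf; simp [pvFalsy] at hnf
      · simp [h1]
  · intro h x hx
    rw [PySem.Set.mem_ofList, List.mem_map] at hx
    obtain ⟨p, hp, rfl⟩ := hx
    have := h p hp
    rw [PySem.Set.mem_ofList]
    by_cases hf : pvFalsy (pvLookup coupe p) = true
    · simp [pvNormKey, hf]
    · simp only [Bool.eq_false_iff.mpr hf, if_false] at this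
      have : pvLookup coupe p = some gender := by simpa using this
      simp [pvNormKey, Bool.eq_false_iff.mpr hf, this]

theorem pvStep_eq (gender : String) (answer : List Int) (coupe : List (Int × Option String)) :
    (match pvLoopA coupe gender (coupe.map Prod.fst) [] with
     | none => answer
     | some a1 => if a1.length < 4 then answer ++ a1 else answer)
    =
    (let groups := (coupe.map Prod.fst).foldl
        (fun d p => d.modify (pvNormKey (pvLookup coupe p)) [] (· ++ [p]))
        PySem.Dict.empty
     if PySem.Set.issubset groups.keys (PySem.Set.ofList [none, some gender])
         && decide ((groups.getD none []).length < 4)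
     then answer ++ groups.getD none [] else answer) := by
  rw [pvLoopA_eq]
  simp only [pvCond_eq, pvGroups_none]
  by_cases hv : ((coupe.map Prod.fst).all (fun p =>
      if pvFalsy (pvLookup coupe p) then true else pvLookup coupe p == some gender)) = true
  · rw [if_pos hv]
    simp only [hv, Bool.true_and, List.nil_append, decide_eq_true_eq]
  · rw [if_neg hv]
    simp only [Bool.eq_false_iff.mpr hv, Bool.false_and, Bool.false_eq_true, if_false]

-- ===== VERDICT =====
theorem empty_places_in_gender_coupe_spec : Claim_equal_empty_places_in_gender_coupe := by
  intro carriage gender _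
  unfold Spec_empty_places_in_gender_coupe empty_places_in_gender_coupe empty_places_in_gender_coupe_alt
  congr 1
  funext answer coupe
  exact pvStep_eq gender answer coupe
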